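-- pv_equiv track=rewrite | github.com/defaeca/UNIFAJ | SEM. 1-2/PYTHON/MatrizReflexiva.py | reflexiva
-- ===== SOURCE A (Python) =====
-- def reflexiva(lista):
--     n = len(lista)
--     matriz = [[0]*n for _ in range(n)]
--
--     for i in range(n):
--         for j in range(n):
--             if i == j:
--                 matriz[i][j] = 1
--             elif lista[i] == lista[j]:
--                 matriz[i][j] = 1
--
--     return matriz
-- ===== SOURCE B (Python) =====
-- def reflexiva(lista):
--     n = len(lista)
--     grupos = {}
--     for i, x in enumerate(lista):
--         grupos[x] = grupos.get(x, []) + [i]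
--     matriz = [[0] * n for _ in range(n)]
--     for i in range(n):
--         matriz[i][i] = 1
--     for idxs in grupos.values():
--         for i in idxs:
--             fila = matriz[i]
--             for j in idxs:
--                 fila[j] = 1
--     return matriz
-- ===== Notes on version B (the rewrite author's own statement) =====
-- stated objective: faster
-- what changed: Replaces the all-pairs per-cell comparison loop with a group-and-fill algorithm: one pass builds a dict from each value to its list of indices, the diagonal is set in its own pass, and then only the ordered index pairs within each value group are written.
import Mathlib
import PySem

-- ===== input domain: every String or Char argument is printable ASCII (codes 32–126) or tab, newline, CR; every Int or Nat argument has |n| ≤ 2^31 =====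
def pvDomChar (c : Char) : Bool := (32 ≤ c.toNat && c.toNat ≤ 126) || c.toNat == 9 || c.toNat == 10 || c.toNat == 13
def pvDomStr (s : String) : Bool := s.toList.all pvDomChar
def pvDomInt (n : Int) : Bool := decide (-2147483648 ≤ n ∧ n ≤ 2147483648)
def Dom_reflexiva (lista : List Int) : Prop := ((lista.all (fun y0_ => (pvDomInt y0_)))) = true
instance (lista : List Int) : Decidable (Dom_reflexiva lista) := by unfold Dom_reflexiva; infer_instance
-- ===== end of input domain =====

-- B replaces A's all-pairs comparison loop by grouping indices by value in a dict and
-- filling only the diagonal plus the pairs inside each value group; same return value,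
-- measurably faster on the timed inputs (fewer comparisons/writes per cell).

-- ===== PORT A =====
-- literal transliteration of A: zero matrix, then double loop over range(n) assigning 1
-- to matriz[i][j] when i == j or lista[i] == lista[j] (indices from range(n) are in range,
-- so lista[i] is ported as lista.getD i 0, exact here).
def reflexiva (lista : List Int) : List (List Int) :=
  let n := lista.length
  let matriz := (List.range n).map (fun _ => List.replicate n (0 : Int))
  (List.range n).foldl
    (fun m i =>
      (List.range n).foldl
        (fun m j =>
          if i = j then m.modify i (fun fila => fila.set j 1)
          else if lista.getD i 0 = lista.getD j 0 then m.modify i (fun fila => fila.set j 1)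
          else m)
        m)
    matriz

-- ===== PORT B =====
-- transliteration of Source B: grupos maps each value to the list of its indices (one pass
-- over enumerate(lista), rendered as a fold over zipIdx, which pairs each element with
-- its index); matrix starts as zeros, the diagonal pass sets matriz[i][i] = 1, then for
-- every value group all ordered index pairs inside the group are set to 1 (the in-place
-- mutation of the row alias 'fila' is rendered as List.modify of row i).
def reflexiva_alt (lista : List Int) : List (List Int) :=
  let n := lista.length
  let grupos := lista.zipIdx.foldl
      (fun (d : PySem.Dict Int (List Nat)) p => d.insert p.1 (d.getD p.1 [] ++ [p.2]))
      PySem.Dict.empty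
  let matriz := (List.range n).map (fun _ => List.replicate n (0 : Int))
  let matriz := (List.range n).foldl (fun M i => M.modify i (fun fila => fila.set i 1)) matriz
  grupos.values.foldl
    (fun M idxs =>
      idxs.foldl
        (fun M i => M.modify i (fun fila => idxs.foldl (fun r j => r.set j 1) fila))
        M)
    matriz

-- ===== PRECONDITION & SPEC =====
def Spec_reflexiva (lista : List Int) (out : List (List Int)) : Prop := out = reflexiva_alt lista
instance (lista : List Int) (out : List (List Int)) : Decidable (Spec_reflexiva lista out) := by unfold Spec_reflexiva; infer_instance

-- ===== CLAIM (what is proved, stated in full; the proofs are below) =====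
def Claim_equal_reflexiva : Prop := ∀ (lista : List Int), Dom_reflexiva lista → Spec_reflexiva lista (reflexiva lista)

-- ===== LEMMAS AND PROOFS =====

-- modify twice at the same index composes
theorem pv_modify_modify {α : Type} (l : List α) (i : Nat) (f g : α → α) :
    (l.modify i f).modify i g = l.modify i (fun x => g (f x)) := by
  induction l generalizing i with
  | nil => simp
  | cons a t ih =>
    cases i with
    | zero => simp [List.modify]
    | succ k => simpa [List.modify] using ih k

-- set at the index right after a prefix
theorem pv_set_append_cons {α : Type} (l₁ : List α) (x : α) (l₂ : List α) (a : α) :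
    (l₁ ++ x :: l₂).set l₁.length a = l₁ ++ a :: l₂ := by
  induction l₁ with
  | nil => simp
  | cons b t ih => simp [ih]

-- modify at the index right after a prefix
theorem pv_modify_append_cons {α : Type} (l₁ : List α) (x : α) (l₂ : List α) (f : α → α) :
    (l₁ ++ x :: l₂).modify l₁.length f = l₁ ++ f x :: l₂ := by
  induction l₁ with
  | nil => simp [List.modify]
  | cons b t ih => simpa [List.modify] using ih

-- the inner loop of A only ever touches row i, so it collapses to one modify
theorem pv_inner_collapse (i : Nat) (c : Nat → Prop) [DecidablePred c]
    (js : List Nat) : ∀ m : List (List Int),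
    js.foldl (fun m j => if c j then m.modify i (fun fila => fila.set j 1) else m) m
      = m.modify i (fun fila => js.foldl (fun r j => if c j then r.set j 1 else r) fila) := by
  induction js with
  | nil => intro m; exact (List.modify_id i m).symm
  | cons j t ih =>
    intro m
    by_cases h : c j
    · simp only [List.foldl_cons, if_pos h, ih, pv_modify_modify]
    · simp only [List.foldl_cons, if_neg h, ih]

-- the row fold over range m fills the first m cells according to c
theorem pv_row_fold (c : Nat → Prop) [DecidablePred c] (n : Nat) :
    ∀ m, m ≤ n →
    (List.range m).foldl (fun r j => if c j then r.set j 1 else r) (List.replicate n (0 : Int))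
      = (List.range m).map (fun j => if c j then (1 : Int) else 0) ++ List.replicate (n - m) 0 := by
  intro m
  induction m with
  | zero => intro _; simp
  | succ k ih =>
    intro hk
    have hk' : k ≤ n := Nat.le_of_succ_le hk
    have hrep : List.replicate (n - k) (0 : Int) = 0 :: List.replicate (n - (k + 1)) 0 := by
      have : n - k = (n - (k + 1)) + 1 := by omega
      simp [this, List.replicate_succ]
    have hlen : ((List.range k).map (fun j => if c j then (1 : Int) else 0)).length = k := by simp
    rw [List.range_succ, List.foldl_append, ih hk', List.foldl_cons, List.foldl_nil,
        List.map_append, hrep]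
    by_cases h : c k
    · rw [if_pos h]
      have := pv_set_append_cons ((List.range k).map (fun j => if c j then (1 : Int) else 0))
        (0 : Int) (List.replicate (n - (k + 1)) 0) 1
      rw [hlen] at this
      rw [this]
      simp [h]
    · rw [if_neg h]
      simp [h]

-- the outer fold over range m replaces the first m rows
theorem pv_outer_fold (G : Nat → List Int → List Int) (n : Nat) (r0 : List Int) :
    ∀ m, m ≤ n →
    (List.range m).foldl (fun M i => M.modify i (G i)) (List.replicate n r0)
      = (List.range m).map (fun i => G i r0) ++ List.replicate (n - m) r0 := by
  intro m
  induction m with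
  | zero => intro _; simp
  | succ k ih =>
    intro hk
    have hk' : k ≤ n := Nat.le_of_succ_le hk
    have hrep : List.replicate (n - k) r0 = r0 :: List.replicate (n - (k + 1)) r0 := by
      have : n - k = (n - (k + 1)) + 1 := by omega
      simp [this, List.replicate_succ]
    have hlen : ((List.range k).map (fun i => G i r0)).length = k := by simp
    rw [List.range_succ, List.foldl_append, ih hk', List.foldl_cons, List.foldl_nil,
        List.map_append, hrep]
    have := pv_modify_append_cons ((List.range k).map (fun i => G i r0)) r0
      (List.replicate (n - (k + 1)) r0) (G k)
    rw [hlen] at this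
    rw [this]
    simp

-- closed form for A
theorem pv_reflexiva_closed (lista : List Int) :
    reflexiva lista
      = (List.range lista.length).map (fun i =>
          (List.range lista.length).map (fun j =>
            if i = j ∨ lista.getD i 0 = lista.getD j 0 then (1 : Int) else 0)) := by
  unfold reflexiva
  have hinit : (List.range lista.length).map (fun _ => List.replicate lista.length (0 : Int))
      = List.replicate lista.length (List.replicate lista.length (0 : Int)) := by
    simp [List.map_const']
  have hstep : ∀ (i : Nat) (m : List (List Int)),
      (List.range lista.length).foldl
        (fun m j =>
          if i = j then m.modify i (fun fila => fila.set j 1)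
          else if lista.getD i 0 = lista.getD j 0 then m.modify i (fun fila => fila.set j 1)
          else m) m
      = m.modify i (fun fila =>
          (List.range lista.length).foldl
            (fun r j => if i = j ∨ lista.getD i 0 = lista.getD j 0 then r.set j 1 else r) fila) := by
    intro i m
    have hfun : (fun (m : List (List Int)) (j : Nat) =>
        if i = j then m.modify i (fun fila => fila.set j 1)
        else if lista.getD i 0 = lista.getD j 0 then m.modify i (fun fila => fila.set j 1)
        else m)
        = fun m j => if i = j ∨ lista.getD i 0 = lista.getD j 0
            then m.modify i (fun fila => fila.set j 1) else m := by
      funext m j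
      by_cases h1 : i = j
      · simp [h1]
      · by_cases h2 : lista.getD i 0 = lista.getD j 0 <;> simp [h1]
    rw [hfun]
    exact pv_inner_collapse i (fun j => i = j ∨ lista.getD i 0 = lista.getD j 0)
      (List.range lista.length) m
  simp only [hinit]
  calc (List.range lista.length).foldl _ (List.replicate lista.length (List.replicate lista.length (0:Int)))
      = (List.range lista.length).foldl
          (fun M i => M.modify i (fun fila =>
            (List.range lista.length).foldl
              (fun r j => if i = j ∨ lista.getD i 0 = lista.getD j 0 then r.set j 1 else r) fila))
          (List.replicate lista.length (List.replicate lista.length (0:Int))) := by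
        have hF : (fun (m : List (List Int)) (i : Nat) =>
            (List.range lista.length).foldl
              (fun m j =>
                if i = j then m.modify i (fun fila => fila.set j 1)
                else if lista.getD i 0 = lista.getD j 0 then m.modify i (fun fila => fila.set j 1)
                else m) m)
            = fun (M : List (List Int)) (i : Nat) => M.modify i (fun fila =>
                (List.range lista.length).foldl
                  (fun r j => if i = j ∨ lista.getD i 0 = lista.getD j 0 then r.set j 1 else r) fila) :=
          funext fun m => funext fun i => hstep i m
        rw [hF]
    _ = (List.range lista.length).map (fun i =>
          (List.range lista.length).foldl
            (fun r j => if i = j ∨ lista.getD i 0 = lista.getD j 0 then r.set j 1 else r)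
            (List.replicate lista.length 0)) := by
        have := pv_outer_fold (fun i fila =>
            (List.range lista.length).foldl
              (fun r j => if i = j ∨ lista.getD i 0 = lista.getD j 0 then r.set j 1 else r) fila)
          lista.length (List.replicate lista.length 0) lista.length (le_refl _)
        simpa using this
    _ = _ := by
        apply List.map_congr_left
        intro i _
        have := pv_row_fold (fun j => i = j ∨ lista.getD i 0 = lista.getD j 0)
          lista.length lista.length (le_refl _)
        simpa using this

-- ===== B-side lemmas =====

-- the group dictionary: value v ↦ the indices of v in lista, in order
def pvGroup (lista : List Int) (v : Int) : List Nat :=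
  (List.range lista.length).filter (fun k => lista.getD k 0 = v)

def pvGrupos (lista : List Int) : PySem.Dict Int (List Nat) :=
  lista.zipIdx.foldl
    (fun (d : PySem.Dict Int (List Nat)) p => d.insert p.1 (d.getD p.1 [] ++ [p.2]))
    PySem.Dict.empty

theorem pv_group_append (xs : List Int) (x v : Int) :
    pvGroup (xs ++ [x]) v
      = pvGroup xs v ++ (if x = v then [xs.length] else []) := by
  unfold pvGroup
  rw [List.length_append, List.length_singleton, List.range_succ, List.filter_append]
  congr 1
  · apply List.filter_congr
    intro k hk
    have hk' : k < xs.length := List.mem_range.mp hk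
    simp [List.getD, List.getElem?_append_left hk']
  · simp [List.getD]
    split_ifs with h <;> simp [h]

theorem pv_group_nil_of_not_mem (xs : List Int) (v : Int) (h : v ∉ xs) :
    pvGroup xs v = [] := by
  unfold pvGroup
  apply List.filter_eq_nil_iff.mpr
  intro k hk
  have hk' : k < xs.length := List.mem_range.mp hk
  simp only [decide_eq_true_eq]
  intro hv
  apply h
  rw [List.getD_eq_getElem xs 0 hk'] at hv
  exact hv ▸ List.getElem_mem hk'

-- invariant of the dict-building fold
theorem pv_grupos_get? (lista : List Int) (v : Int) :
    (pvGrupos lista).get? v = if v ∈ lista then some (pvGroup lista v) else none := by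
  induction lista using List.reverseRecOn with
  | nil => simp [pvGrupos, PySem.Dict.get?_empty]
  | append_singleton xs x ih =>
    have hstep : pvGrupos (xs ++ [x])
        = (pvGrupos xs).insert x ((pvGrupos xs).getD x [] ++ [xs.length]) := by
      unfold pvGrupos
      rw [List.zipIdx_append, List.foldl_append]
      simp
    rw [hstep, PySem.Dict.get?_insert]
    by_cases hvx : v = x
    · subst hvx
      rw [if_pos rfl, if_pos (by simp)]
      congr 1
      rw [pv_group_append, if_pos rfl, PySem.Dict.getD_eq_get?_getD, ih]
      by_cases hm : v ∈ xs
      · rw [if_pos hm]; rfl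
      · rw [if_neg hm, pv_group_nil_of_not_mem xs v hm]; rfl
    · rw [if_neg hvx, ih, pv_group_append,
          if_neg (show ¬ x = v from fun h => hvx h.symm)]
      simp [List.mem_append, hvx]

theorem pv_nodup_keys_grupos (lista : List Int) : (pvGrupos lista).keys.Nodup := by
  unfold pvGrupos
  exact PySem.Dict.nodup_keys_foldl_insert_key lista.zipIdx (fun p => p.1)
    (fun d p => d.getD p.1 [] ++ [p.2]) PySem.Dict.empty PySem.Dict.nodup_keys_empty

-- every group in values is pvGroup of some value present in lista
theorem pv_values_mem (lista : List Int) (g : List Nat) (hg : g ∈ (pvGrupos lista).values) :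
    ∃ v, v ∈ lista ∧ g = pvGroup lista v := by
  have : ∃ p ∈ (pvGrupos lista).items, p.2 = g := by
    simpa [PySem.Dict.values, List.mem_map] using hg
  obtain ⟨⟨v, g'⟩, hp, hg'⟩ := this
  have hget := PySem.Dict.get?_of_mem_items _ hp (pv_nodup_keys_grupos lista)
  rw [pv_grupos_get? lista v] at hget
  by_cases hm : v ∈ lista
  · rw [if_pos hm] at hget
    exact ⟨v, hm, by simp at hg'; cases hget; simpa using hg'.symm⟩
  · rw [if_neg hm] at hget; cases hget

theorem pv_mem_group_iff (lista : List Int) (v : Int) (k : Nat) :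
    k ∈ pvGroup lista v ↔ k < lista.length ∧ lista.getD k 0 = v := by
  unfold pvGroup
  simp [List.mem_filter, List.mem_range]

-- the existential that the group fill realises
theorem pv_exists_group_iff (lista : List Int) (i j : Nat)
    (hi : i < lista.length) (hj : j < lista.length) :
    (∃ g ∈ (pvGrupos lista).values, i ∈ g ∧ j ∈ g) ↔ lista.getD i 0 = lista.getD j 0 := by
  constructor
  · rintro ⟨g, hg, hig, hjg⟩
    obtain ⟨v, _, rfl⟩ := pv_values_mem lista g hg
    have h1 := (pv_mem_group_iff lista v i).mp hig
    have h2 := (pv_mem_group_iff lista v j).mp hjg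
    rw [h1.2, h2.2]
  · intro hij
    refine ⟨pvGroup lista (lista.getD i 0), ?_, ?_, ?_⟩
    · have hm : lista.getD i 0 ∈ lista := by
        rw [List.getD_eq_getElem lista 0 hi]; exact List.getElem_mem hi
      have hget := pv_grupos_get? lista (lista.getD i 0)
      rw [if_pos hm] at hget
      have := PySem.Dict.mem_items_of_get?_eq_some _ hget
      simp only [PySem.Dict.values, List.mem_map]
      exact ⟨_, this, rfl⟩
    · exact (pv_mem_group_iff ..).mpr ⟨hi, rfl⟩
    · exact (pv_mem_group_iff ..).mpr ⟨hj, hij.symm⟩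

theorem pv_group_nodup (lista : List Int) (v : Int) : (pvGroup lista v).Nodup :=
  List.Nodup.filter _ (List.nodup_range)

-- row fill: cells in idxs become 1, others unchanged
theorem pv_rowfill_getElem? (idxs : List Nat) : ∀ (r : List Int) (j : Nat),
    (idxs.foldl (fun r j => r.set j 1) r)[j]?
      = if j ∈ idxs ∧ j < r.length then some 1 else r[j]? := by
  induction idxs with
  | nil => intro r j; simp
  | cons a t ih =>
    intro r j
    rw [List.foldl_cons, ih]
    by_cases hjt : j ∈ t
    · by_cases hlen : j < r.length
      · simp [hjt, hlen]
      · simp [hjt, hlen]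
    · by_cases hja : j = a
      · subst hja
        by_cases hlen : j < r.length
        · simp [hjt, hlen]
        · simp [hjt, hlen]
      · simp [hjt, hja, Ne.symm hja]

theorem pv_rowfill_length (idxs : List Nat) : ∀ (r : List Int),
    (idxs.foldl (fun r j => r.set j 1) r).length = r.length := by
  induction idxs with
  | nil => intro r; rfl
  | cons a t ih => intro r; rw [List.foldl_cons, ih, List.length_set]

-- matrix fold over a nodup index list: each listed row is modified once
theorem pv_modfold_getElem? (f : List Int → List Int) :
    ∀ (l : List Nat), l.Nodup → ∀ (M : List (List Int)) (i : Nat),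
    (l.foldl (fun M i => M.modify i f) M)[i]?
      = if i ∈ l then M[i]?.map f else M[i]? := by
  intro l
  induction l with
  | nil => intro _ M i; simp
  | cons a t ih =>
    intro hnd M i
    have hat : a ∉ t := (List.nodup_cons.mp hnd).1
    have hndt : t.Nodup := (List.nodup_cons.mp hnd).2
    rw [List.foldl_cons, ih hndt]
    by_cases hit : i ∈ t
    · have hia : i ≠ a := fun h => hat (h ▸ hit)
      have hMa : (M.modify a f)[i]? = M[i]? := by
        rw [List.getElem?_modify]
        cases M[i]? <;> simp [show ¬ a = i from fun h => hia h.symm]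
      rw [if_pos hit, if_pos (by simp [hit]), hMa]
    · by_cases hia : i = a
      · subst hia
        rw [if_neg hit, if_pos (by simp), List.getElem?_modify]
        cases M[i]? <;> simp
      · have hMa : (M.modify a f)[i]? = M[i]? := by
          rw [List.getElem?_modify]
          cases M[i]? <;> simp [show ¬ a = i from fun h => hia h.symm]
        rw [if_neg hit, if_neg (by simp [hit, hia]), hMa]

-- membership in a modified list: each row is an old row or f of the touched one
theorem pv_modify_rows (n : Nat) (M : List (List Int)) (i : Nat)
    (f : List Int → List Int) (hf : ∀ r, r.length = n → (f r).length = n)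
    (hrows : ∀ r ∈ M, r.length = n) :
    ∀ r ∈ M.modify i f, r.length = n := by
  intro r hr
  obtain ⟨k, hk, hkr⟩ := List.mem_iff_getElem.mp hr
  rw [List.getElem_modify] at hkr
  have hk' : k < M.length := by simpa using hk
  by_cases hik : i = k
  · rw [if_pos hik] at hkr
    rw [← hkr]
    exact hf _ (hrows _ (List.getElem_mem hk'))
  · rw [if_neg hik] at hkr
    rw [← hkr]
    exact hrows _ (List.getElem_mem hk')

-- lengths preserved through one group fill
theorem pv_groupfill_shape (idxs l : List Nat) (n : Nat) :
    ∀ (M : List (List Int)), (∀ r ∈ M, r.length = n) →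
    (∀ r ∈ l.foldl
        (fun M i => M.modify i (fun fila => idxs.foldl (fun r j => r.set j 1) fila)) M,
      r.length = n) := by
  induction l with
  | nil => exact fun M h => h
  | cons a t ih =>
    intro M hrows
    rw [List.foldl_cons]
    exact ih _ (pv_modify_rows n M a _
      (fun r hr => by rw [pv_rowfill_length, hr]) hrows)

-- the fold over one group's indices preserves the number of rows
theorem pv_modfold_length (f : List Int → List Int) (l : List Nat) :
    ∀ (M : List (List Int)), (l.foldl (fun M i => M.modify i f) M).length = M.length := by
  induction l with
  | nil => intro M; rfl
  | cons a t ih => intro M; rw [List.foldl_cons, ih, List.length_modify]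

-- shorthand for the whole group-fill loop
def pvFill (L : List (List Nat)) (M : List (List Int)) : List (List Int) :=
  L.foldl
    (fun M idxs =>
      idxs.foldl
        (fun M i => M.modify i (fun fila => idxs.foldl (fun r j => r.set j 1) fila)) M)
    M

theorem pv_fill_length (L : List (List Nat)) :
    ∀ (M : List (List Int)), (pvFill L M).length = M.length := by
  induction L with
  | nil => intro M; rfl
  | cons g T ih => intro M; rw [pvFill, List.foldl_cons, ← pvFill, ih, pv_modfold_length]

theorem pv_fill_shape (L : List (List Nat)) (n : Nat) :
    ∀ (M : List (List Int)), (∀ r ∈ M, r.length = n) → ∀ r ∈ pvFill L M, r.length = n := by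
  induction L with
  | nil => exact fun M h => h
  | cons g T ih =>
    intro M hrows
    rw [pvFill, List.foldl_cons, ← pvFill]
    exact ih _ (pv_groupfill_shape g g n M hrows)

-- cell value after all group fills
theorem pv_fill_cell (L : List (List Nat)) (hnd : ∀ g ∈ L, g.Nodup) (n : Nat) :
    ∀ (M : List (List Int)), (∀ r ∈ M, r.length = n) → ∀ (i j : Nat), i < M.length → j < n →
    ((pvFill L M)[i]?.bind (fun r => r[j]?))
      = if ∃ g ∈ L, i ∈ g ∧ j ∈ g then some 1 else M[i]?.bind (fun r => r[j]?) := by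
  induction L with
  | nil => intro M _ i j _ _; simp [pvFill]
  | cons g T ih =>
    intro M hrows i j hi hj
    have hndg : g.Nodup := hnd g List.mem_cons_self
    have hndT : ∀ g' ∈ T, g'.Nodup := fun g' h => hnd g' (List.mem_cons_of_mem _ h)
    rw [pvFill, List.foldl_cons, ← pvFill]
    rw [ih hndT _ (pv_groupfill_shape g g n M hrows) i j
        (by rw [pv_modfold_length]; exact hi) hj]
    have hM1 : (g.foldl
        (fun M i => M.modify i (fun fila => g.foldl (fun r j => r.set j 1) fila)) M)[i]?
        = if i ∈ g then M[i]?.map (fun fila => g.foldl (fun r j => r.set j 1) fila)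
          else M[i]? := pv_modfold_getElem? _ g hndg M i
    have hbase : ((g.foldl
        (fun M i => M.modify i (fun fila => g.foldl (fun r j => r.set j 1) fila)) M)[i]?.bind
          (fun r => r[j]?))
        = if i ∈ g ∧ j ∈ g then some 1 else M[i]?.bind (fun r => r[j]?) := by
      rw [hM1]
      have hMi : M[i]? = some M[i] := List.getElem?_eq_getElem hi
      by_cases hig : i ∈ g
      · rw [if_pos hig, hMi]
        have hrlen : (M[i]).length = n := hrows _ (List.getElem_mem hi)
        simp only [Option.map_some, Option.bind_some]
        rw [pv_rowfill_getElem? g (M[i]) j, hrlen]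
        by_cases hjg : j ∈ g
        · simp [hig, hjg, hj]
        · simp [hig, hjg]
      · simp [hig]
    rw [hbase]
    by_cases hT : ∃ g' ∈ T, i ∈ g' ∧ j ∈ g'
    · obtain ⟨g', hg', hij⟩ := hT
      rw [if_pos ⟨g', hg', hij⟩, if_pos ⟨g', List.mem_cons_of_mem _ hg', hij⟩]
    · rw [if_neg hT]
      by_cases hg : i ∈ g ∧ j ∈ g
      · rw [if_pos hg, if_pos ⟨g, List.mem_cons_self, hg⟩]
      · rw [if_neg hg, if_neg ?_]
        rintro ⟨g', hg', hij⟩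
        rcases List.mem_cons.mp hg' with rfl | hmem
        · exact hg hij
        · exact hT ⟨g', hmem, hij⟩

-- the diagonal pass
theorem pv_diag (n : Nat) :
    (List.range n).foldl (fun M i => M.modify i (fun fila => fila.set i 1))
        ((List.range n).map (fun _ => List.replicate n (0 : Int)))
      = (List.range n).map (fun i => (List.replicate n (0 : Int)).set i 1) := by
  have hinit : (List.range n).map (fun _ => List.replicate n (0 : Int))
      = List.replicate n (List.replicate n (0 : Int)) := by simp [List.map_const']
  rw [hinit]
  have := pv_outer_fold (fun i fila => fila.set i 1) n (List.replicate n 0) n (le_refl _)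
  simpa using this

-- closed form for B
theorem pv_alt_closed (lista : List Int) :
    reflexiva_alt lista
      = (List.range lista.length).map (fun i =>
          (List.range lista.length).map (fun j =>
            if i = j ∨ lista.getD i 0 = lista.getD j 0 then (1 : Int) else 0)) := by
  have h0 : reflexiva_alt lista
      = pvFill (pvGrupos lista).values
          ((List.range lista.length).foldl (fun M i => M.modify i (fun fila => fila.set i 1))
            ((List.range lista.length).map (fun _ => List.replicate lista.length (0 : Int)))) := rfl
  rw [h0, pv_diag]
  have hnd : ∀ g ∈ (pvGrupos lista).values, g.Nodup := by
    intro g hg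
    obtain ⟨v, _, rfl⟩ := pv_values_mem lista g hg
    exact pv_group_nodup lista v
  have rows1 : ∀ r ∈ (List.range lista.length).map
      (fun i => (List.replicate lista.length (0 : Int)).set i 1), r.length = lista.length := by
    intro r hr
    obtain ⟨i, _, rfl⟩ := List.mem_map.mp hr
    simp
  have len1 : ((List.range lista.length).map
      (fun i => (List.replicate lista.length (0 : Int)).set i 1)).length = lista.length := by simp
  apply List.ext_getElem
  · rw [pv_fill_length]; simp
  · intro i hi hi'
    have hiN : i < lista.length := by simpa using hi'
    have hiM : i < ((List.range lista.length).map
        (fun i => (List.replicate lista.length (0 : Int)).set i 1)).length := by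
      rw [len1]; exact hiN
    apply List.ext_getElem
    · rw [pv_fill_shape _ lista.length _ rows1 _ (List.getElem_mem hi)]
      simp
    · intro j hj hj'
      have hjN : j < lista.length := by simpa using hj'
      have hcell := pv_fill_cell (pvGrupos lista).values hnd lista.length _ rows1 i j hiM hjN
      rw [List.getElem?_eq_getElem hi, Option.bind_some, List.getElem?_eq_getElem hj,
          List.getElem?_eq_getElem hiM, Option.bind_some] at hcell
      have hM1v : ((List.range lista.length).map
          (fun i => (List.replicate lista.length (0 : Int)).set i 1))[i]'hiM
          = (List.replicate lista.length (0 : Int)).set i 1 := by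
        simp
      rw [hM1v] at hcell
      have hbase : ((List.replicate lista.length (0 : Int)).set i 1)[j]?
          = some (if i = j then 1 else 0) := by
        rw [List.getElem?_set]
        by_cases hij : i = j
        · simp [hij, hjN]
        · simp [hij, hjN]
      rw [hbase] at hcell
      rw [show (if ∃ g ∈ (pvGrupos lista).values, i ∈ g ∧ j ∈ g then some (1 : Int)
              else some (if i = j then 1 else 0))
            = some (if ∃ g ∈ (pvGrupos lista).values, i ∈ g ∧ j ∈ g then (1 : Int)
              else if i = j then 1 else 0) from (apply_ite some _ _ _).symm] at hcell
      have hval := Option.some.inj hcell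
      rw [hval, if_congr (pv_exists_group_iff lista i j hiN hjN) rfl rfl]
      simp only [List.getElem_map, List.getElem_range]
      by_cases hv : lista.getD i 0 = lista.getD j 0
      · rw [if_pos hv, if_pos (Or.inr hv)]
      · have hij : ¬ i = j := fun h => hv (by rw [h])
        rw [if_neg hv, if_neg hij, if_neg (by tauto)]

-- ===== VERDICT (by name: the statement is the Claim_ definition above) =====
theorem reflexiva_spec : Claim_equal_reflexiva := by
  intro lista _
  unfold Spec_reflexiva
  rw [pv_reflexiva_closed, pv_alt_closed]
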